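-- pv_equiv track=rewrite | github.com/pypi-data/pypi-mirror-320 | packages/sub-tools/sub_tools-0.4.2-py3-none-any.whl/sub_tools/media/segmenter.py | _filter_ranges
-- ===== SOURCE A (Python) =====
-- def _filter_ranges(
--     ranges: list[tuple[int, int]],
--     max_silence_length: int,
-- ) -> list[tuple[int, int]]:
--     """
--     Filters ranges by keeping only consecutive segments within max_silence_length.
--     """
--     if not ranges:
--         return []
--
--     filtered_ranges = [ranges[0]]
--     for current_range in ranges[1:]:
--         if current_range[0] - filtered_ranges[-1][1] > max_silence_length:
--             break
--         filtered_ranges.append(current_range)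
--
--     return filtered_ranges
-- ===== SOURCE B (Python) =====
-- def _filter_ranges(
--     ranges: list[tuple[int, int]],
--     max_silence_length: int,
-- ) -> list[tuple[int, int]]:
--     # Recursive decomposition: the answer is the head prepended to the answer
--     # for the tail, cut off as soon as the gap to the next range is too large.
--     if len(ranges) < 2:
--         return list(ranges)
--     if ranges[1][0] - ranges[0][1] > max_silence_length:
--         return [ranges[0]]
--     return [ranges[0]] + _filter_ranges(ranges[1:], max_silence_length)
-- ===== Notes on version B (the rewrite author's own statement) =====
-- stated objective: simpler
-- what changed: Replaced the iterative append-accumulator loop with a break by a structural recursion that prepends the head to the recursive result on the tail (output built back-to-front by cons, no accumulator, no negative indexing).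
import Mathlib
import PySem

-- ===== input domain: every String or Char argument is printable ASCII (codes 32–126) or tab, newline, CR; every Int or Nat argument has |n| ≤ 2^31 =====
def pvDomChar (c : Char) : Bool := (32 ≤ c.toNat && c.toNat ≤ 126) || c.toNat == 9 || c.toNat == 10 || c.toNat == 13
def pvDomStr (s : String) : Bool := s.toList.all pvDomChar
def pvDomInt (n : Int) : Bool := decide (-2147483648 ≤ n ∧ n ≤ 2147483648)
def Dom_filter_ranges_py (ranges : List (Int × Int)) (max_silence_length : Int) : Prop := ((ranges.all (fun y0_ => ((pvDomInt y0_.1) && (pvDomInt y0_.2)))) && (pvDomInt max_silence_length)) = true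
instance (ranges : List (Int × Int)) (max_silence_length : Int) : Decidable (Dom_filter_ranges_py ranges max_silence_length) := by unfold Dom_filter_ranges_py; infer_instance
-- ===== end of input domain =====

-- B replaces A's append-accumulator loop with a break by a structural recursion that
-- prepends the head to the recursive result on the tail — simpler, same behaviour.

-- ===== PORT A =====
-- loop of A: filtered_ranges starts as [ranges[0]]; for each later range, break on a
-- gap larger than max_silence_length (filtered_ranges[-1] ported with pyGetD; the
-- accumulator is never empty), otherwise append.
def filterRangesLoopA (max_silence_length : Int) (acc : List (Int × Int)) :
    List (Int × Int) → List (Int × Int)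
  | [] => acc
  | c :: rest =>
    if c.1 - (PySem.List.pyGetD acc (-1) (0, 0)).2 > max_silence_length then acc
    else filterRangesLoopA max_silence_length (acc ++ [c]) rest

def filter_ranges_py (ranges : List (Int × Int)) (max_silence_length : Int) : List (Int × Int) :=
  match ranges with
  | [] => []
  | r :: rest => filterRangesLoopA max_silence_length [r] rest

-- ===== PORT B =====
-- B: structural recursion; with fewer than two ranges return the list itself,
-- otherwise cut if the first gap is too large, else cons the head onto the
-- recursive result on the tail.
def filter_ranges_py_alt (ranges : List (Int × Int)) (max_silence_length : Int) : List (Int × Int) :=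
  match ranges with
  | [] => []
  | [r] => [r]
  | r :: c :: rest =>
    if c.1 - r.2 > max_silence_length then [r]
    else r :: filter_ranges_py_alt (c :: rest) max_silence_length

-- ===== PRECONDITION & SPEC =====
def Spec_filter_ranges_py (ranges : List (Int × Int)) (max_silence_length : Int) (out : List (Int × Int)) : Prop := out = filter_ranges_py_alt ranges max_silence_length
instance (ranges : List (Int × Int)) (max_silence_length : Int) (out : List (Int × Int)) : Decidable (Spec_filter_ranges_py ranges max_silence_length out) := by unfold Spec_filter_ranges_py; infer_instance

-- ===== CLAIM =====
def Claim_equal_filter_ranges_py : Prop := ∀ (ranges : List (Int × Int)) (max_silence_length : Int), Dom_filter_ranges_py ranges max_silence_length → Spec_filter_ranges_py ranges max_silence_length (filter_ranges_py ranges max_silence_length)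

-- ===== LEMMAS AND PROOFS =====

lemma alt_cons (m : Int) (r : Int × Int) (t : List (Int × Int)) :
    filter_ranges_py_alt (r :: t) m =
      match t with
      | [] => [r]
      | c :: _ => if c.1 - r.2 > m then [r] else r :: filter_ranges_py_alt t m := by
  cases t <;> simp [filter_ranges_py_alt]

lemma loopA_eq_alt (m : Int) (t : List (Int × Int)) :
    ∀ (acc : List (Int × Int)) (h : acc ≠ []),
      filterRangesLoopA m acc t = acc ++ (filter_ranges_py_alt (acc.getLast h :: t) m).tail := by
  induction t with
  | nil => intro acc h; simp [filterRangesLoopA, filter_ranges_py_alt]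
  | cons c rest ih =>
    intro acc h
    rw [alt_cons]
    simp only [filterRangesLoopA, PySem.List.pyGetD_neg_one acc (0,0) h]
    split_ifs with hc
    · simp
    · rw [ih (acc ++ [c]) (by simp), alt_cons]
      cases rest with
      | nil => simp [filter_ranges_py_alt]
      | cons d ds =>
        simp only [filter_ranges_py_alt]
        split_ifs <;> simp_all

-- ===== VERDICT =====
theorem filter_ranges_py_spec : Claim_equal_filter_ranges_py := by
  intro ranges m _
  unfold Spec_filter_ranges_py
  cases ranges with
  | nil => simp [filter_ranges_py, filter_ranges_py_alt]
  | cons r t =>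
    have h1 := loopA_eq_alt m t [r] (by simp)
    simp only [List.getLast_singleton] at h1
    have h2 : filter_ranges_py_alt (r :: t) m = r :: (filter_ranges_py_alt (r :: t) m).tail := by
      cases t with
      | nil => simp [filter_ranges_py_alt]
      | cons c cs => simp only [filter_ranges_py_alt]; split_ifs <;> simp
    rw [filter_ranges_py, h1, h2]
    simp
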